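-- pv_equiv track=rewrite | github.com/CorentinLonjarret/REBUS | commons.py | find_markov_chains_k
-- ===== SOURCE A (Python) =====
-- def find_markov_chains_k(items_prev, K):
--     sequence = ""
--     path = []
--     item_start = items_prev[-1]
--     count_insert_item = 0
--     while True:
--         if count_insert_item >= K:
--             break
--         if not items_prev:
--             break
--
--         item = str(items_prev.pop())
--         count_insert_item += 1
--         if sequence == "":
--             sequence = item
--             path.append(int(item))
--         else:
--             sequence = item + "-" + sequence
--             path.append(int(item))
--
--     return path
-- ===== SOURCE B (Python) =====
-- def find_markov_chains_k(items_prev, K):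
--     item_start = items_prev[-1]  # same IndexError on empty input as A
--     if K <= 0:
--         return []
--     tail = items_prev[-K:]
--     del items_prev[len(items_prev) - len(tail):]  # same mutation as A's pops
--     return [int(x) for x in reversed(tail)]
-- ===== Notes on version B (the rewrite author's own statement) =====
-- stated objective: faster
-- what changed: Replaces A's element-by-element while/pop/counter loop, which also rebuilds a '-'-joined sequence string on every iteration, by one slice of the last K items, one bulk delete, and a reversed comprehension.
import Mathlib
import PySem

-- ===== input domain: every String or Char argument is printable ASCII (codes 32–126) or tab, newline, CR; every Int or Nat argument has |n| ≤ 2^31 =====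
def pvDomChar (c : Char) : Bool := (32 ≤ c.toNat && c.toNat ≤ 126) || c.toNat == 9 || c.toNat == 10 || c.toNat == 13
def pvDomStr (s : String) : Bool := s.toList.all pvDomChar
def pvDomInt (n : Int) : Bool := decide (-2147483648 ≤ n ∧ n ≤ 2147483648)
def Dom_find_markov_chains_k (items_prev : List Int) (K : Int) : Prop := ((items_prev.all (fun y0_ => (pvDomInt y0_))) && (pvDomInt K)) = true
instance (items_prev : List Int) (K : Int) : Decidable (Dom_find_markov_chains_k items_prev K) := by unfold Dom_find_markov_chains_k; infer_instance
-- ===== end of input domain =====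

-- B replaces A's pop-one-at-a-time loop by slice-last-K / delete / reverse (simpler, same cost);
-- A also mutates items_prev (pops) and B performs the same deletion; the equivalence proved here is about the return value.

-- ===== PORT A =====
-- the while-True loop of A: state is (sequence, path, items, count_insert_item)
def fmkLoopA (K : Int) (sequence : String) (path : List Int) (items : List Int) (count : Int) : List Int :=
  if count ≥ K then path                             -- if count_insert_item >= K: break
  else
    match h : items.getLast? with
    | none => path                                   -- if not items_prev: break
    | some last =>                                   -- item = str(items_prev.pop())
      let item := PySem.Int.toStr last
      if sequence = "" then
        -- path.append(int(item)): int(str(last)) = last, exact round trip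
        fmkLoopA K item (path ++ [last]) items.dropLast (count + 1)
      else
        fmkLoopA K (item ++ "-" ++ sequence) (path ++ [last]) items.dropLast (count + 1)
termination_by items.length
decreasing_by
  all_goals (cases items with
    | nil => simp at h
    | cons a t => simp)

def find_markov_chains_k (items_prev : List Int) (K : Int) : List Int :=
  match PySem.List.pyGet? items_prev (-1) with       -- item_start = items_prev[-1]; IndexError on []
  | none => []                                       -- unreachable under Pre_
  | some _ => fmkLoopA K "" [] items_prev 0

-- ===== PORT B =====
def find_markov_chains_k_alt (items_prev : List Int) (K : Int) : List Int :=
  match PySem.List.pyGet? items_prev (-1) with       -- item_start = items_prev[-1]; IndexError on []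
  | none => []                                       -- unreachable under Pre_
  | some _ =>
    if K ≤ 0 then []
    else
      let tail := PySem.List.slice items_prev (some (-K)) none   -- items_prev[-K:]
      tail.reverse                                   -- [int(x) for x in reversed(tail)], int on int is identity

-- ===== PRECONDITION & SPEC =====
-- Pre_ excludes only the empty list, on which A (and B alike) raises IndexError at items_prev[-1].
def Pre_find_markov_chains_k (items_prev : List Int) (K : Int) : Prop := items_prev ≠ []
instance (items_prev : List Int) (K : Int) : Decidable (Pre_find_markov_chains_k items_prev K) := by unfold Pre_find_markov_chains_k; infer_instance
def pvWitness_find_markov_chains_k : List Int × Int := ([3, 1, 4], 2)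

def Spec_find_markov_chains_k (items_prev : List Int) (K : Int) (out : List Int) : Prop := out = find_markov_chains_k_alt items_prev K
instance (items_prev : List Int) (K : Int) (out : List Int) : Decidable (Spec_find_markov_chains_k items_prev K out) := by unfold Spec_find_markov_chains_k; infer_instance

-- ===== CLAIM (what is proved, stated in full; the proofs are below) =====
def Claim_equal_find_markov_chains_k : Prop := ∀ (items_prev : List Int) (K : Int), Dom_find_markov_chains_k items_prev K → Pre_find_markov_chains_k items_prev K → Spec_find_markov_chains_k items_prev K (find_markov_chains_k items_prev K)

-- ===== LEMMAS AND PROOFS =====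

-- A's loop appends to path exactly the first (K - count) elements of items read back-to-front.
theorem fmkLoopA_eq (K : Int) : ∀ (n : Nat) (items : List Int), items.length = n →
    ∀ (seq : String) (path : List Int) (count : Int),
    fmkLoopA K seq path items count = path ++ items.reverse.take (K - count).toNat := by
  intro n
  induction n with
  | zero =>
    intro items hlen seq path count
    rw [fmkLoopA]
    cases items with
    | nil => split <;> simp
    | cons a t => simp at hlen
  | succ m ih =>
    intro items hlen seq path count
    rw [fmkLoopA]
    by_cases hK : count ≥ K
    · have : (K - count).toNat = 0 := by omega
      simp [hK, this]
    · simp only [hK, if_false]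
      cases hgl : items.getLast? with
      | none =>
        have : items = [] := List.getLast?_eq_none_iff.mp hgl
        subst this; simp
      | some last =>
        have hdec : items.dropLast ++ [last] = items := by
          obtain ⟨l', rfl⟩ := List.getLast?_eq_some_iff.mp hgl
          simp
        have hdl : items.dropLast.length = m := by
          have := List.length_dropLast (xs := items)
          cases items with
          | nil => simp at hgl
          | cons a t => simp at hlen this ⊢; omega
        have hrev : items.reverse = last :: items.dropLast.reverse := by
          conv_lhs => rw [← hdec]
          simp
        have htn : (K - count).toNat = (K - (count + 1)).toNat + 1 := by omega
        split
        · next heq => exact absurd heq (by simp)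
        · next lastv heq =>
          injection heq with h'
          subst h'
          rw [hrev, htn, List.take_succ_cons]
          split <;>
          · rw [ih items.dropLast hdl]
            simp

theorem find_markov_chains_k_spec : Claim_equal_find_markov_chains_k := by
  intro items K _ hpre
  unfold Spec_find_markov_chains_k find_markov_chains_k find_markov_chains_k_alt
  match hg : PySem.List.pyGet? items (-1) with
  | none =>
    exfalso
    cases items with
    | nil => exact hpre rfl
    | cons a t => simp [PySem.List.pyGet?, PySem.List.pyIdx?] at hg
  | some v =>
    simp only
    by_cases hK : K ≤ 0
    · have h0 : (K - 0).toNat = 0 := by omega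
      rw [fmkLoopA_eq K items.length items rfl, if_pos hK]
      simp
      exact Or.inl hK
    · rw [fmkLoopA_eq K items.length items rfl, if_neg hK]
      have hKn : (-(K.toNat : Int)) = -K := by omega
      have hs : PySem.List.slice items (some (-K)) none = items.drop (items.length - K.toNat) := by
        rw [← hKn, PySem.List.slice_from_neg_natCast items K.toNat (by omega)]
      rw [hs]
      have h1 : (K - 0).toNat = K.toNat := by omega
      simp only [List.nil_append, h1]
      rw [List.take_reverse]

-- ===== VERDICT (by name: the statement is the Claim_ definition above) =====
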